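-- pv_equiv track=rewrite | github.com/sassongal/Peroot | Prut/web/tools/crewai-ui-audit/src/ui_audit_crew/tools/sitemap.py | label_urls
-- ===== SOURCE A (Python) =====
-- from typing import Iterable
--
-- def _normalize_base_url(base_url: str) -> str:
--     base_url = base_url.strip()
--     return base_url[:-1] if base_url.endswith("/") else base_url
--
-- def label_urls(urls: Iterable[str], base_url: str) -> list[tuple[str, str]]:
--     """
--     Lightweight labeling so the mapper agent gets useful hints.
--     """
--     base = _normalize_base_url(base_url)
--     labeled: list[tuple[str, str]] = []
--     for u in urls:
--         path = u.replace(base, "", 1) or "/"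
--         if path == "/":
--             label = "home"
--         elif path.startswith("/pricing"):
--             label = "pricing"
--         elif path.startswith("/login"):
--             label = "login"
--         elif path.startswith("/guides"):
--             label = "guides"
--         elif path.startswith("/blog"):
--             label = "blog"
--         elif path.startswith("/prompts"):
--             label = "prompts"
--         elif path.startswith("/p/"):
--             label = "shared-prompt"
--         else:
--             label = path.strip("/").split("/")[0][:40] or "page"
--         labeled.append((label, u))
--     return labeled
-- ===== SOURCE B (Python) =====
-- def _normalize_base_url(base_url: str) -> str:
--     base_url = base_url.strip()
--     return base_url[:-1] if base_url.endswith("/") else base_url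
--
-- _TABLE = [
--     ("/pricing", "pricing"),
--     ("/login", "login"),
--     ("/guides", "guides"),
--     ("/blog", "blog"),
--     ("/prompts", "prompts"),
--     ("/p/", "shared-prompt"),
-- ]
--
-- def _label_of(path: str) -> str:
--     if path == "/":
--         return "home"
--     for prefix, label in _TABLE:
--         if path.startswith(prefix):
--             return label
--     stripped = path.strip("/")
--     seg = ""
--     for ch in stripped:
--         if ch == "/":
--             break
--         seg += ch
--     return seg[:40] or "page"
--
-- def label_urls(urls, base_url: str):
--     base = _normalize_base_url(base_url)
--     return [(_label_of(u.replace(base, "", 1) or "/"), u) for u in urls]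
-- ===== Notes on version B (the rewrite author's own statement) =====
-- stated objective: idiomatic
-- what changed: B replaces the unrolled if/elif chain with a first-match scan over a data table of (prefix, label) pairs, computes the fallback segment by a single char scan with break instead of strip/split/index, and builds the result as a comprehension instead of an append loop.
import Mathlib
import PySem

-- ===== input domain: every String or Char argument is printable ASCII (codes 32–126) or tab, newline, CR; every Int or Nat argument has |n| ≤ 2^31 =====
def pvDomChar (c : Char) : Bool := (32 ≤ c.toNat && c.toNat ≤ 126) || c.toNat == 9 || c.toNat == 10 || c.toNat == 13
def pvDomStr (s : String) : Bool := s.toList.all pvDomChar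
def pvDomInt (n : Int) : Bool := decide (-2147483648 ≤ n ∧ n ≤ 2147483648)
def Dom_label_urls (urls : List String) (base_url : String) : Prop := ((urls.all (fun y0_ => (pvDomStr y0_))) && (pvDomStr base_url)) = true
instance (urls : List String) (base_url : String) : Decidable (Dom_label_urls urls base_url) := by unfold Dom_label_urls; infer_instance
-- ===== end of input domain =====

-- B labels each URL via a data table of (prefix, label) pairs scanned first-match and a
-- single char-scan fallback, instead of A's unrolled if/elif chain with strip/split indexing (idiomatic rewrite, same cost).


-- ===== PORT A =====
-- exact hand port of Python's s.replace(old, "", 1) (the new string is empty): remove the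
-- first occurrence of old, if any; for old = "" Python inserts "" in front, leaving s unchanged,
-- which this definition also returns (the [] prefix matches at the first position and drop 0 = id)
def pvReplaceFirst (old : List Char) : List Char → List Char
  | [] => []
  | c :: rest =>
    if old.isPrefixOf (c :: rest) then (c :: rest).drop old.length
    else c :: pvReplaceFirst old rest

-- _normalize_base_url (shared verbatim by both Pythons)
def pvNormalizeBase (base_url : String) : List Char :=
  let b := PySem.Chars.strip base_url.toList
  if PySem.Chars.endswith b "/".toList then PySem.Chars.slice b none (some (-1)) else b

-- the if/elif chain of A; the [0] on the split result always exists (split never returns []),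
-- ported as pyGetD with default []
def pvLabelA (path : List Char) : String :=
  if path = "/".toList then "home"
  else if PySem.Chars.startswith path "/pricing".toList then "pricing"
  else if PySem.Chars.startswith path "/login".toList then "login"
  else if PySem.Chars.startswith path "/guides".toList then "guides"
  else if PySem.Chars.startswith path "/blog".toList then "blog"
  else if PySem.Chars.startswith path "/prompts".toList then "prompts"
  else if PySem.Chars.startswith path "/p/".toList then "shared-prompt"
  else
    let seg := PySem.List.pyGetD (PySem.Chars.splitOn (PySem.Chars.stripChars path "/".toList) "/".toList) 0 []
    let seg40 := PySem.List.slice seg none (some 40)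
    if seg40 = [] then "page" else String.ofList seg40

def label_urls (urls : List String) (base_url : String) : List (String × String) :=
  let base := pvNormalizeBase base_url
  urls.foldl (fun labeled u =>
    let path := let p := pvReplaceFirst base u.toList; if p = [] then "/".toList else p
    labeled ++ [(pvLabelA path, u)]) []

-- ===== PORT B =====
def pvLabelTable : List (String × String) :=
  [("/pricing", "pricing"), ("/login", "login"), ("/guides", "guides"),
   ("/blog", "blog"), ("/prompts", "prompts"), ("/p/", "shared-prompt")]

-- the char loop with break of Source B = takeWhile
def pvLabelB (path : List Char) : String :=
  if path = "/".toList then "home"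
  else
    match pvLabelTable.find? (fun pl => PySem.Chars.startswith path pl.1.toList) with
    | some pl => pl.2
    | none =>
      let seg := ((PySem.Chars.stripChars path "/".toList).takeWhile (· ≠ '/')).take 40
      if seg = [] then "page" else String.ofList seg

def label_urls_alt (urls : List String) (base_url : String) : List (String × String) :=
  let base := pvNormalizeBase base_url
  urls.map (fun u =>
    (pvLabelB (let p := pvReplaceFirst base u.toList; if p = [] then "/".toList else p), u))

-- ===== PRECONDITION & SPEC =====
def Spec_label_urls (urls : List String) (base_url : String) (out : List (String × String)) : Prop := out = label_urls_alt urls base_url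
instance (urls : List String) (base_url : String) (out : List (String × String)) : Decidable (Spec_label_urls urls base_url out) := by unfold Spec_label_urls; infer_instance

-- ===== CLAIM (what is proved, stated in full; the proofs are below) =====
def Claim_equal_label_urls : Prop := ∀ (urls : List String) (base_url : String), Dom_label_urls urls base_url → Spec_label_urls urls base_url (label_urls urls base_url)

-- ===== LEMMAS AND PROOFS =====

-- splitOn.go distributes over the accumulator
lemma splitOn_go_acc (sep : List Char) (fuel : Nat) :
    ∀ (l cur : List Char) (acc : List (List Char)),
      PySem.Chars.splitOn.go sep fuel l cur acc = acc.reverse ++ PySem.Chars.splitOn.go sep fuel l cur [] := by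
  induction fuel with
  | zero =>
    intro l cur acc
    simp [PySem.Chars.splitOn.go]
  | succ fuel ih =>
    intro l cur acc
    cases l with
    | nil => simp [PySem.Chars.splitOn.go]
    | cons c rest =>
      simp only [PySem.Chars.splitOn.go]
      by_cases h : sep.isPrefixOf (c :: rest)
      · simp only [h, if_true]
        rw [ih _ [] (cur.reverse :: acc), ih _ [] [cur.reverse]]
        simp
      · simp only [h]
        exact ih rest (c :: cur) acc

-- the first piece produced by splitOn on separator "/" is the takeWhile (· ≠ '/') prefix
lemma splitOn_go_head (fuel : Nat) :
    ∀ (l cur : List Char), l.length ≤ fuel →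
      (PySem.Chars.splitOn.go ['/'] fuel l cur []).headD [] = cur.reverse ++ l.takeWhile (· ≠ '/') := by
  induction fuel with
  | zero =>
    intro l cur h
    have : l = [] := List.length_eq_zero_iff.mp (Nat.le_zero.mp h)
    subst this
    simp [PySem.Chars.splitOn.go]
  | succ fuel ih =>
    intro l cur h
    cases l with
    | nil => simp [PySem.Chars.splitOn.go]
    | cons c rest =>
      simp only [PySem.Chars.splitOn.go]
      by_cases hc : c = '/'
      · subst hc
        have hp : List.isPrefixOf ['/'] ('/' :: rest) = true := by
          simp [List.isPrefixOf]
        simp only [hp, if_true]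
        rw [splitOn_go_acc]
        simp [List.takeWhile]
      · have hp : List.isPrefixOf ['/'] (c :: rest) = false := by
          simp [List.isPrefixOf]
          exact fun h' => absurd h'.symm hc
        simp only [hp, Bool.false_eq_true, if_false]
        rw [ih rest (c :: cur) (by simpa using Nat.succ_le_succ_iff.mp h)]
        simp [List.takeWhile, hc]

lemma splitOn_head (s : List Char) :
    PySem.List.pyGetD (PySem.Chars.splitOn s ['/']) 0 [] = s.takeWhile (· ≠ '/') := by
  have h := splitOn_go_head (s.length + 1) s [] (by omega)
  simp only [List.reverse_nil, List.nil_append] at h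
  rw [PySem.Chars.splitOn, PySem.List.pyGetD_zero, ← h]
  cases PySem.Chars.splitOn.go ['/'] (s.length + 1) s [] [] <;> simp

-- the two label functions agree on every path
lemma label_eq (path : List Char) : pvLabelA path = pvLabelB path := by
  unfold pvLabelA pvLabelB pvLabelTable
  simp only [List.find?]
  by_cases h0 : path = "/".toList
  · simp [h0]
  by_cases h1 : PySem.Chars.startswith path "/pricing".toList <;>
  by_cases h2 : PySem.Chars.startswith path "/login".toList <;>
  by_cases h3 : PySem.Chars.startswith path "/guides".toList <;>
  by_cases h4 : PySem.Chars.startswith path "/blog".toList <;>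
  by_cases h5 : PySem.Chars.startswith path "/prompts".toList <;>
  by_cases h6 : PySem.Chars.startswith path "/p/".toList <;>
    simp only [h0, h1, h2, h3, h4, h5, h6, if_true, if_false, Bool.false_eq_true] <;>
    try rfl
  -- remaining case: the fallback branch
  rw [show ("/".toList : List Char) = ['/'] from rfl, splitOn_head,
    PySem.List.slice_to _ (by norm_num : (0:Int) ≤ 40)]
  simp

-- ===== VERDICT (by name: the statement is the Claim_ definition above) =====
theorem label_urls_spec : Claim_equal_label_urls := by
  intro urls base_url _
  unfold Spec_label_urls label_urls label_urls_alt
  rw [PySem.List.foldl_append_singleton_eq_map]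
  simp [label_eq]
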